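-- pv_equiv track=rewrite | github.com/TashiRabten/GlossarioBUDA | namsel_ocr/recognize.py | _enumrate_full_paths
-- ===== SOURCE A (Python) =====
-- def _enumrate_full_paths(tree):
--     if len(tree) == 1:
--         return tree[0]
--     combs = []
--     frow = tree[-1]
--     srow = tree[-2]
--
--     for s in srow:
--         for f in frow:
--             combs.append(s+f)
--     tree.pop()
--     tree.pop()
--     tree.append(combs)
--     return _enumrate_full_paths(tree)
-- ===== SOURCE B (Python) =====
-- def _enumrate_full_paths(tree):
--     # Iterative forward left fold over the rows; does NOT mutate tree
--     # (A rewrites tree in place to [result]); same return value.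
--     result = tree[0]
--     for row in tree[1:]:
--         result = [a + b for a in result for b in row]
--     return result
-- ===== Notes on version B (the rewrite author's own statement) =====
-- stated objective: simpler
-- what changed: Replaces the back-to-front recursive pairwise folding (which pops and rewrites the input list each step) with a single forward left fold accumulating the Cartesian product row by row, without mutating the argument.
import Mathlib
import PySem

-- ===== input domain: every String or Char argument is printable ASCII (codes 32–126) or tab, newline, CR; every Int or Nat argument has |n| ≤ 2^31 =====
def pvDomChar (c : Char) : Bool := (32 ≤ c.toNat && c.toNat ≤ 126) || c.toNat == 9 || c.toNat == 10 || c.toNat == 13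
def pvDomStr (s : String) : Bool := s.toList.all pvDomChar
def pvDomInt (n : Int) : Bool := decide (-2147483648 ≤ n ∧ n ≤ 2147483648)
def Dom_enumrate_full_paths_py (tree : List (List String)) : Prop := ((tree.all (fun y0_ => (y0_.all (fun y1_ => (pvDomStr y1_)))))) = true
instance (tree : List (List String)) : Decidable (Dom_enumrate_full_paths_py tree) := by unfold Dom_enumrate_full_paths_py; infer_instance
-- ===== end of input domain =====

-- Header: B replaces A's recursive back-to-front pairwise folding (which mutates the
-- argument list in place) with a forward left fold over the rows; objective: simpler.
-- A mutates `tree` in place (pops / rewrites it); the equivalence proved here is about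
-- the RETURN value only — B leaves the argument unchanged.

-- ===== PORT A =====
-- Literal transliteration of A: len==1 returns tree[0]; otherwise combine the LAST two
-- rows into `combs`, replace them by `combs` (tree.pop(); tree.pop(); tree.append(combs)
-- = dropLast.dropLast ++ [combs]) and recurse.  Where Python raises IndexError
-- (tree = [], so tree[-1] fails; excluded by Pre_) the port returns [].
def enumrate_full_paths_py (tree : List (List String)) : List String :=
  if tree.length = 1 then (PySem.List.pyGet? tree 0).getD []
  else if _h2 : 2 ≤ tree.length then
    let frow := (PySem.List.pyGet? tree (-1)).getD []
    let srow := (PySem.List.pyGet? tree (-2)).getD []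
    let combs := srow.foldl (fun acc s => acc ++ frow.map (fun f => s ++ f)) []
    enumrate_full_paths_py (tree.dropLast.dropLast ++ [combs])
  else []
termination_by tree.length
decreasing_by
  simp only [List.length_append, List.length_dropLast, List.length_cons, List.length_nil]
  omega

-- ===== PORT B =====
def enumrate_full_paths_py_alt (tree : List (List String)) : List String :=
  match tree with
  | [] => []   -- Python B raises IndexError on tree[0]; excluded by Pre_
  | r0 :: rest =>
    rest.foldl (fun result row => result.flatMap (fun a => row.map (fun b => a ++ b))) r0

-- ===== PRECONDITION & SPEC =====
-- Pre_ excludes only the empty tree, on which both Pythons raise IndexError.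
def Pre_enumrate_full_paths_py (tree : List (List String)) : Prop := tree ≠ []
instance (tree : List (List String)) : Decidable (Pre_enumrate_full_paths_py tree) := by unfold Pre_enumrate_full_paths_py; infer_instance
def pvWitness_enumrate_full_paths_py : List (List String) := [["a", "b"], ["x"]]

def Spec_enumrate_full_paths_py (tree : List (List String)) (out : List String) : Prop := out = enumrate_full_paths_py_alt tree
instance (tree : List (List String)) (out : List String) : Decidable (Spec_enumrate_full_paths_py tree out) := by unfold Spec_enumrate_full_paths_py; infer_instance

-- ===== CLAIM (what is proved, stated in full; the proofs are below) =====
def Claim_equal_enumrate_full_paths_py : Prop := ∀ (tree : List (List String)), Dom_enumrate_full_paths_py tree → Pre_enumrate_full_paths_py tree → Spec_enumrate_full_paths_py tree (enumrate_full_paths_py tree)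

-- ===== LEMMAS AND PROOFS =====

-- the row-combination step shared (definitionally) by both ports
def pvComb (xs ys : List String) : List String :=
  xs.flatMap (fun a => ys.map (fun b => a ++ b))

lemma pvComb_assoc (xs ys zs : List String) :
    pvComb (pvComb xs ys) zs = pvComb xs (pvComb ys zs) := by
  induction xs with
  | nil => simp [pvComb]
  | cons x xs ih =>
    simp only [pvComb, List.flatMap_cons, List.flatMap_append] at ih ⊢
    rw [ih]
    congr 1
    simp [List.flatMap_map, List.map_flatMap, List.map_map, Function.comp_def, String.append_assoc]

lemma pvFoldA_eq_comb (srow frow : List String) :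
    srow.foldl (fun acc s => acc ++ frow.map (fun f => s ++ f)) [] = pvComb srow frow := by
  simp [pvComb, List.flatMap]

lemma alt_eq_foldl (r0 : List String) (rest : List (List String)) :
    enumrate_full_paths_py_alt (r0 :: rest) = rest.foldl pvComb r0 := by
  simp only [enumrate_full_paths_py_alt]
  congr

lemma alt_last_two (l : List (List String)) (x y r0 : List String) :
    enumrate_full_paths_py_alt (r0 :: (l ++ [x, y])) =
    enumrate_full_paths_py_alt (r0 :: (l ++ [pvComb x y])) := by
  simp [alt_eq_foldl, List.foldl_append, pvComb_assoc]

lemma split_last_two (tree : List (List String)) (h : 2 ≤ tree.length) :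
    ∃ l x y, tree = l ++ [x, y] := by
  rcases List.eq_nil_or_concat tree with rfl | ⟨t1, y, rfl⟩
  · simp at h
  rcases List.eq_nil_or_concat t1 with rfl | ⟨l, x, rfl⟩
  · simp at h
  exact ⟨l, x, y, by simp⟩

lemma main_eq : ∀ (n : Nat) (tree : List (List String)), tree.length = n → tree ≠ [] →
    enumrate_full_paths_py tree = enumrate_full_paths_py_alt tree := by
  intro n
  induction n using Nat.strong_induction_on with
  | _ n ih =>
    intro tree hlen hne
    match tree, hne with
    | [r], _ =>
      simp [enumrate_full_paths_py, enumrate_full_paths_py_alt]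
    | r0 :: r1 :: rs, _ =>
      have h2 : 2 ≤ (r0 :: r1 :: rs).length := by simp
      obtain ⟨l, x, y, heq⟩ := split_last_two (r0 :: r1 :: rs) h2
      have hlenl : l.length + 2 = n := by
        have := congrArg List.length heq; simp at this hlen; omega
      rw [heq]
      rw [enumrate_full_paths_py]
      have hlen1 : (l ++ [x, y]).length ≠ 1 := by simp
      rw [if_neg hlen1, dif_pos (by simp)]
      have hfrow : PySem.List.pyGet? (l ++ [x, y]) (-1) = some y := by
        have : l ++ [x, y] = (l ++ [x]) ++ [y] := by simp
        rw [this, PySem.List.pyGet?_neg_one_append_singleton]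
      have hsrow : PySem.List.pyGet? (l ++ [x, y]) (-2) = some x := by
        rw [PySem.List.pyGet?_neg_ofNat _ 2 (by omega) (by simp)]
        simp
      have hdrop : (l ++ [x, y]).dropLast.dropLast = l := by
        have h1 : (l ++ [x, y]).dropLast = l ++ [x] := by
          have : l ++ [x, y] = (l ++ [x]) ++ [y] := by simp
          rw [this, List.dropLast_concat]
        rw [h1, List.dropLast_concat]
      simp only [hfrow, hsrow, hdrop, Option.getD_some]
      rw [pvFoldA_eq_comb]
      have hrec := ih (l ++ [pvComb x y]).length (by simp; omega)
          (l ++ [pvComb x y]) rfl (by simp)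
      rw [hrec]
      -- both sides are now B's value; reduce to alt_last_two on a cons-decomposition
      match l with
      | [] => simp [enumrate_full_paths_py_alt, pvComb]
      | a :: l' =>
        exact (alt_last_two l' x y a).symm

-- ===== VERDICT (by name: the statement is the Claim_ definition above) =====
theorem enumrate_full_paths_py_spec : Claim_equal_enumrate_full_paths_py := by
  intro tree _ hpre
  unfold Spec_enumrate_full_paths_py
  exact main_eq tree.length tree rfl hpre
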